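-- pv_equiv track=rewrite | github.com/winnie-wildin/QuantEase | backend/app/utils/json_normalizer.py | detect_keys
-- ===== SOURCE A (Python) =====
-- from typing import List, Dict, Tuple
--
-- def detect_keys(sample: Dict) -> Tuple[str, str, bool]:
--     """
--     Detect input and output keys from a sample JSON object.
--
--     Args:
--         sample: Single JSON object from user upload
--
--     Returns:
--         (input_key, output_key, has_output)
--     """
--     keys = list(sample.keys())
--
--     # Common input key variations
--     input_variations = ['input', 'input_text', 'text', 'prompt', 'question']
--     # Common output key variations
--     output_variations = ["output", "label", "answer", "response", "target", "ground_truth", "expected_output", 'ground_truth_output']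
--
--     input_key = None
--     output_key = None
--
--     # Find input key
--     for key in keys:
--         if key.lower() in input_variations:
--             input_key = key
--             break
--
--     # Find output key
--     for key in keys:
--         if key.lower() in output_variations and key != input_key:
--             output_key = key
--             break
--
--     has_output = output_key is not None
--
--     return input_key, output_key, has_output
-- ===== SOURCE B (Python) =====
-- def detect_keys(sample):
--     input_variations = ['input', 'input_text', 'text', 'prompt', 'question']
--     output_variations = ["output", "label", "answer", "response", "target", "ground_truth", "expected_output", 'ground_truth_output']
--     input_key = None
--     output_key = None
--     for key in sample.keys():
--         low = key.lower()
--         if input_key is None and low in input_variations: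
--             input_key = key
--         if output_key is None and low in output_variations:
--             output_key = key
--         if input_key is not None and output_key is not None:
--             break
--     return input_key, output_key, output_key is not None
-- ===== Notes on version B (the rewrite author's own statement) =====
-- stated objective: simpler
-- what changed: Replaces A's two separate first-match scans over the keys with a single pass that tracks both keys at once and breaks early once both are found; the key != input_key guard is dropped because the two variation lists are disjoint (proved vacuous).
import Mathlib
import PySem

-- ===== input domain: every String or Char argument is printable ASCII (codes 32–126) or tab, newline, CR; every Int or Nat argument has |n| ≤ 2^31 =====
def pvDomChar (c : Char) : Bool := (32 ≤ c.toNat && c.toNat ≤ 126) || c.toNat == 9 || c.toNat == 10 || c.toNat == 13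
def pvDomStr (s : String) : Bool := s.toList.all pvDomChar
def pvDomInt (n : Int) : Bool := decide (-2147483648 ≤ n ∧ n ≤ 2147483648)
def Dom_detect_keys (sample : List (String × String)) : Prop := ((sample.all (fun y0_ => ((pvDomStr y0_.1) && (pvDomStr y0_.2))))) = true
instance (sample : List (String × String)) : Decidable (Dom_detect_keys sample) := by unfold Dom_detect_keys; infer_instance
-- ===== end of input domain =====

-- B merges A's two separate first-match scans into one early-breaking pass tracking both keys;
-- the disjointness of the variation lists makes A's key != input_key guard vacuous (objective: simpler).


def inputVariations : List String := ["input", "input_text", "text", "prompt", "question"]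
def outputVariations : List String := ["output", "label", "answer", "response", "target", "ground_truth", "expected_output", "ground_truth_output"]

-- ===== PORT A =====
-- first loop: find input key (first key whose lower() is in input_variations)
def findInputLoop : List String → Option String
  | [] => none
  | k :: rest =>
    if inputVariations.contains (PySem.Str.lower k) then some k else findInputLoop rest

-- second loop: find output key (first key whose lower() is in output_variations and key != input_key)
def findOutputLoop (input_key : Option String) : List String → Option String
  | [] => none
  | k :: rest =>
    if outputVariations.contains (PySem.Str.lower k) && !(input_key == some k) then some k
    else findOutputLoop input_key rest

def detect_keys (sample : List (String × String)) : Option String × Option String × Bool :=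
  let keys := sample.map Prod.fst
  let input_key := findInputLoop keys
  let output_key := findOutputLoop input_key keys
  let has_output := output_key.isSome
  (input_key, output_key, has_output)

-- ===== PORT B =====
-- single pass maintaining both trackers, breaking early once both are found
def bothLoop : Option String → Option String → List String → Option String × Option String
  | ik, ok, [] => (ik, ok)
  | ik, ok, k :: rest =>
    let low := PySem.Str.lower k
    let ik' := if ik.isNone && inputVariations.contains low then some k else ik
    let ok' := if ok.isNone && outputVariations.contains low then some k else ok
    if ik'.isSome && ok'.isSome then (ik', ok') else bothLoop ik' ok' rest

def detect_keys_alt (sample : List (String × String)) : Option String × Option String × Bool :=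
  let p := bothLoop none none (sample.map Prod.fst)
  (p.1, p.2, p.2.isSome)

-- ===== PRECONDITION & SPEC =====
def Spec_detect_keys (sample : List (String × String)) (out : Option String × Option String × Bool) : Prop := out = detect_keys_alt sample
instance (sample : List (String × String)) (out : Option String × Option String × Bool) : Decidable (Spec_detect_keys sample out) := by unfold Spec_detect_keys; infer_instance

-- ===== CLAIM (what is proved, stated in full; the proofs are below) =====
def Claim_equal_detect_keys : Prop := ∀ (sample : List (String × String)), Dom_detect_keys sample → Spec_detect_keys sample (detect_keys sample)

-- ===== LEMMAS AND PROOFS =====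

-- unguarded output scan (A's second loop without the vacuous key != input_key test)
def findOutputLoop' : List String → Option String
  | [] => none
  | k :: rest =>
    if outputVariations.contains (PySem.Str.lower k) then some k else findOutputLoop' rest

-- the two variation lists are disjoint
theorem variations_disjoint (s : String) (h : inputVariations.contains s = true) :
    outputVariations.contains s = false := by
  simp [inputVariations, List.contains_eq_mem] at h
  rcases h with h | h | h | h | h <;> subst h <;> decide

theorem findInputLoop_mem (keys : List String) (j : String)
    (h : findInputLoop keys = some j) : inputVariations.contains (PySem.Str.lower j) = true := by
  induction keys with
  | nil => simp [findInputLoop] at h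
  | cons k rest ih =>
    simp only [findInputLoop] at h
    split_ifs at h with hc
    · cases h; exact hc
    · exact ih h

-- given that input_key's lowercase is in inputVariations, the guard is vacuous
theorem findOutputLoop_eq (ik : Option String)
    (hik : ∀ j, ik = some j → inputVariations.contains (PySem.Str.lower j) = true)
    (keys : List String) : findOutputLoop ik keys = findOutputLoop' keys := by
  induction keys with
  | nil => rfl
  | cons k rest ih =>
    simp only [findOutputLoop, findOutputLoop']
    by_cases ho : outputVariations.contains (PySem.Str.lower k) = true
    · have hne : (ik == some k) = false := by
        cases ik with
        | none => rfl
        | some j =>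
          by_cases hj : j = k
          · subst hj
            have := hik j rfl
            have := variations_disjoint _ this
            rw [this] at ho; exact absurd ho (by simp)
          · simp [hj]
      simp [ho, hne, ih]
    · have hm : PySem.Str.lower k ∉ outputVariations := by
        simpa [List.contains_eq_mem] using ho
      simp [hm, ih]

-- "fill" semantics of the trackers
def fillI (ik : Option String) (keys : List String) : Option String :=
  match ik with | some j => some j | none => findInputLoop keys

def fillO (ok : Option String) (keys : List String) : Option String :=
  match ok with | some j => some j | none => findOutputLoop' keys

theorem bothLoop_eq (keys : List String) : ∀ ik ok,
    bothLoop ik ok keys = (fillI ik keys, fillO ok keys) := by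
  induction keys with
  | nil => intro ik ok; cases ik <;> cases ok <;> rfl
  | cons k rest ih =>
    intro ik ok
    simp only [bothLoop]
    have hI : ∀ b : Option String,
        (if b.isNone && inputVariations.contains (PySem.Str.lower k) then some k else b)
          = fillI b [k] := by
      intro b; cases b with
      | some j => rfl
      | none => simp [fillI, findInputLoop]
    have hfI : ∀ b : Option String, fillI (fillI b [k]) rest = fillI b (k :: rest) := by
      intro b; cases b with
      | some j => rfl
      | none =>
        simp only [fillI, findInputLoop]
        split_ifs with hc <;> simp
    have hfO : ∀ b : Option String, fillO (fillO b [k]) rest = fillO b (k :: rest) := by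
      intro b; cases b with
      | some j => rfl
      | none =>
        simp only [fillO, findOutputLoop']
        split_ifs with hc <;> simp
    have hO : ∀ b : Option String,
        (if b.isNone && outputVariations.contains (PySem.Str.lower k) then some k else b)
          = fillO b [k] := by
      intro b; cases b with
      | some j => rfl
      | none => simp [fillO, findOutputLoop']
    rw [hI ik, hO ok]
    split_ifs with hb
    · -- early break: both trackers already some, the rest of the list cannot change them
      obtain ⟨h1, h2⟩ := Bool.and_eq_true_iff.mp hb
      rw [← hfI ik, ← hfO ok]
      cases hi : fillI ik [k] with
      | none => rw [hi] at h1; simp at h1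
      | some j =>
        cases ho2 : fillO ok [k] with
        | none => rw [ho2] at h2; simp at h2
        | some j2 => rfl
    · rw [ih, hfI, hfO]

-- ===== VERDICT (by name: the statement is the Claim_ definition above) =====
theorem detect_keys_spec : Claim_equal_detect_keys := by
  intro sample _
  unfold Spec_detect_keys detect_keys detect_keys_alt
  rw [bothLoop_eq]
  simp only [fillI, fillO]
  rw [findOutputLoop_eq _ (fun j h => findInputLoop_mem _ j h)]
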